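-- pv_equiv track=rewrite | github.com/karthikpappu/pyc_source | pycfiles/gentex-0.1.2-py3.7-linux-x86_64/sphere.cpython-37.py | sphere_shell
-- ===== SOURCE A (Python) =====
-- def bres_circle(xm, ym, r):
--     circ = []
--     x = -r
--     y = 0
--     err = 2 - 2 * r
--     while x < 0:
--         circ.append([xm - x, ym + y])
--         circ.append([xm - y, ym - x])
--         circ.append([xm + x, ym - y])
--         circ.append([xm + y, ym + x])
--         r = err
--         if r > x:
--             x += 1
--             err += x * 2 + 1
--         if r <= y:
--             y += 1
--             err += y * 2 + 1
--
--     return circ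
--
-- def get_radii(r):
--     zero_circle = bres_circle(0, 0, r)
--     radii = []
--     if r > 1:
--         for step in range(r + 1):
--             for zc in zero_circle:
--                 if zc[0] == step and zc[1] > 0:
--                     radii.append(zc[1])
--
--     else:
--         radii = [
--          1, 0]
--     return radii
--
-- def sphere_shell(xm, ym, zm, r):
--     shell = []
--     radii = get_radii(r)
--     for z in range(len(radii) - 1):
--         circ = bres_circle(xm, ym, radii[z])
--         for ci in circ:
--             withzp = ci + [z + zm]
--             shell.append(withzp)
--             if z > 0:
--                 withzm = ci + [zm - z]
--                 shell.append(withzm)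
--
--     for x in range(-radii[r], radii[r] + 1):
--         for y in range(-radii[r], radii[r] + 1):
--             shell.append([x + xm, y + ym, r + zm])
--             shell.append([x + xm, y + ym, zm - r])
--
--     return shell
-- ===== SOURCE B (Python) =====
-- def _step(x, y, err):
--     # one Bresenham state transition (the body of the original while-loop sans the appends)
--     if err > x:
--         if err <= y:
--             return x + 1, y + 1, err + (x + 1) * 2 + 1 + (y + 1) * 2 + 1
--         return x + 1, y, err + (x + 1) * 2 + 1
--     if err <= y:
--         return x, y + 1, err + (y + 1) * 2 + 1
--     return x, y, err
--
-- def _states(r):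
--     out = []
--     x, y, err = -r, 0, 2 - 2 * r
--     while x < 0:
--         out.append((x, y))
--         x, y, err = _step(x, y, err)
--     return out
--
-- def _quad(xm, ym, s):
--     x, y = s
--     return [[xm - x, ym + y], [xm - y, ym - x], [xm + x, ym - y], [xm + y, ym + x]]
--
-- def bres_circle(xm, ym, r):
--     return [p for s in _states(r) for p in _quad(xm, ym, s)]
--
-- def get_radii(r):
--     if r <= 1:
--         return [1, 0]
--     index = {}
--     for zc in bres_circle(0, 0, r):
--         if zc[1] > 0:
--             index.setdefault(zc[0], []).append(zc[1])
--     out = []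
--     for step in range(r + 1):
--         out.extend(index.get(step, []))
--     return out
--
-- def _ring(xm, ym, zm, radii, z):
--     circ = bres_circle(xm, ym, radii[z])
--     if z == 0:
--         return [ci + [zm] for ci in circ]
--     return [p for ci in circ for p in (ci + [zm + z], ci + [zm - z])]
--
-- def sphere_shell(xm, ym, zm, r):
--     radii = get_radii(r)
--     bands = [p for z in range(len(radii) - 1) for p in _ring(xm, ym, zm, radii, z)]
--     cap = radii[r]
--     caps = [[x + xm, y + ym, zc]
--             for x in range(-cap, cap + 1)
--             for y in range(-cap, cap + 1)
--             for zc in (r + zm, zm - r)]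
--     return bands + caps
-- ===== Notes on version B (the rewrite author's own statement) =====
-- stated objective: alternative
-- what changed: The whole pipeline is re-decomposed: the Bresenham loop becomes a pure state-transition function plus a state trace from which the four quadrant points are emitted afterwards; get_radii's nested step-by-step rescans of the circle are replaced by one grouping pass building a dict from x-coordinate to its positive y-values, concatenated per step; and the shell is assembled as per-z ring lists plus a cap block joined by comprehensions/concatenation instead of per-point appends into one accumulator, preserving the exact output order.
import Mathlib
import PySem

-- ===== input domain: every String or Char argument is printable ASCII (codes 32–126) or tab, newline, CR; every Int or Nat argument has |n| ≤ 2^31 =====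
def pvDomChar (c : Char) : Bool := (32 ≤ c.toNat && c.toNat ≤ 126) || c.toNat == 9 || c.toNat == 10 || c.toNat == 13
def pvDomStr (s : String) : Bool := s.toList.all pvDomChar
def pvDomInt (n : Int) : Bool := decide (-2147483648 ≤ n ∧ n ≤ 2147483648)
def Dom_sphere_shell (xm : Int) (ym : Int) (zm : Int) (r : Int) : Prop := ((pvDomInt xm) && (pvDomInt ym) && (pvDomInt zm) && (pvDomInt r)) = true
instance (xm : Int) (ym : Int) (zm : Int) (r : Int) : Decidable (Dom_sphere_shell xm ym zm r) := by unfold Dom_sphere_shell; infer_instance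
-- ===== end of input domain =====

-- B re-decomposes the whole pipeline: a pure state-transition function plus a cons-built state
-- trace replaces A's in-loop point appends, radii come from one dict-grouping pass instead of
-- A's step-by-step circle rescans, and the shell is the concatenation of per-z rings and the
-- cap block (flatMaps) instead of one append-accumulating fold; output order is identical.

-- ===== PORT A =====
-- A's bres_circle while-loop, ported with a fuel counter (structural recursion): the fuel at the
-- entry point is a generous upper bound on the iteration count, a totality guard only.  In the
-- branch ¬(err > x) ∧ ¬(err ≤ y) Python's loop re-runs with unchanged state (an infinite loop,
-- unreachable for y ≥ 0, and the loop is only ever entered with y = 0); the port recurses with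
-- the same state there, burning fuel, exactly as the Python does.
def bresLoop (xm ym : Int) : Nat → Int → Int → Int → List (List Int) → List (List Int)
  | 0, _, _, _, acc => acc
  | fuel + 1, x, y, err, acc =>
    if x < 0 then
      let acc' := acc ++ [[xm - x, ym + y], [xm - y, ym - x], [xm + x, ym - y], [xm + y, ym + x]]
      if err > x then
        if err ≤ y then bresLoop xm ym fuel (x + 1) (y + 1) ((err + ((x + 1) * 2 + 1)) + ((y + 1) * 2 + 1)) acc'
        else bresLoop xm ym fuel (x + 1) y (err + ((x + 1) * 2 + 1)) acc'
      else
        if err ≤ y then bresLoop xm ym fuel x (y + 1) (err + ((y + 1) * 2 + 1)) acc'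
        else bresLoop xm ym fuel x y err acc'
    else acc

def bres_circle (xm ym r : Int) : List (List Int) :=
  bresLoop xm ym ((r.toNat + 2) * (r.toNat + 2)) (-r) 0 (2 - 2 * r) []

-- zc[0] / zc[1] ported as pyGetD with default 0: exact, since every element of bres_circle is a
-- two-element list, so the index never raises.
def get_radii (r : Int) : List Int :=
  let zero_circle := bres_circle 0 0 r
  if r > 1 then
    (PySem.List.pyRange 0 (r + 1) 1).foldl (fun radii step =>
      zero_circle.foldl (fun radii zc =>
        if PySem.List.pyGetD zc 0 0 = step ∧ 0 < PySem.List.pyGetD zc 1 0 then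
          radii ++ [PySem.List.pyGetD zc 1 0]
        else radii) radii) []
  else [1, 0]

-- radii[z] for z < len(radii) - 1 is always in range: pyGetD with default 0 is exact there.
-- radii[r] is ported with pyGet?: none is exactly Python's IndexError (excluded by Pre_).
def sphere_shell (xm : Int) (ym : Int) (zm : Int) (r : Int) : List (List Int) :=
  let radii := get_radii r
  let shell := (PySem.List.pyRange 0 ((radii.length : Int) - 1) 1).foldl (fun shell z =>
      let circ := bres_circle xm ym (PySem.List.pyGetD radii z 0)
      circ.foldl (fun shell ci =>
        let shell := shell ++ [ci ++ [z + zm]]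
        if z > 0 then shell ++ [ci ++ [zm - z]] else shell) shell) []
  match PySem.List.pyGet? radii r with
  | none => shell   -- Python raises IndexError here; such inputs are outside Pre_
  | some rad =>
    (PySem.List.pyRange (-rad) (rad + 1) 1).foldl (fun shell x =>
      (PySem.List.pyRange (-rad) (rad + 1) 1).foldl (fun shell y =>
        shell ++ [[x + xm, y + ym, r + zm], [x + xm, y + ym, zm - r]]) shell) shell

-- ===== PORT B =====
-- B's _step: one pure Bresenham state transition.
def bresNext (x y err : Int) : Int × Int × Int :=
  if x < err then
    if err ≤ y then (x + 1, y + 1, err + ((x + 1) * 2 + 1) + ((y + 1) * 2 + 1))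
    else (x + 1, y, err + ((x + 1) * 2 + 1))
  else
    if err ≤ y then (x, y + 1, err + ((y + 1) * 2 + 1))
    else (x, y, err)

-- B's _states loop, built head-first, with the same fuel totality guard as the A port.
def bresStatesB : Nat → Int → Int → Int → List (Int × Int)
  | 0, _, _, _ => []
  | fuel + 1, x, y, err =>
    if x < 0 then
      (x, y) :: bresStatesB fuel (bresNext x y err).1 (bresNext x y err).2.1 (bresNext x y err).2.2
    else []

-- B's _quad: the four quadrant points of one recorded state.
def quadPoints (xm ym : Int) (s : Int × Int) : List (List Int) :=
  [[xm - s.1, ym + s.2], [xm - s.2, ym - s.1], [xm + s.1, ym - s.2], [xm + s.2, ym + s.1]]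

def bres_circle_alt (xm ym r : Int) : List (List Int) :=
  ((bresStatesB ((r.toNat + 2) * (r.toNat + 2)) (-r) 0 (2 - 2 * r)).flatMap (quadPoints xm ym))

-- index.setdefault(zc[0], []).append(zc[1]) is Dict.modify zc[0] [] (· ++ [zc[1]])
def get_radii_alt (r : Int) : List Int :=
  if r ≤ 1 then [1, 0]
  else
    let index : PySem.Dict Int (List Int) :=
      (bres_circle_alt 0 0 r).foldl (fun d zc =>
        if 0 < PySem.List.pyGetD zc 1 0 then
          d.modify (PySem.List.pyGetD zc 0 0) [] (fun l => l ++ [PySem.List.pyGetD zc 1 0])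
        else d) PySem.Dict.empty
    (PySem.List.pyRange 0 (r + 1) 1).foldl (fun radii step => radii ++ index.getD step []) []

-- B's _ring: the band of points contributed by one z level.
def ringAt (xm ym zm : Int) (radii : List Int) (z : Int) : List (List Int) :=
  let circ := bres_circle_alt xm ym (PySem.List.pyGetD radii z 0)
  if z = 0 then circ.map (fun ci => ci ++ [zm])
  else circ.flatMap (fun ci => [ci ++ [zm + z], ci ++ [zm - z]])

def sphere_shell_alt (xm : Int) (ym : Int) (zm : Int) (r : Int) : List (List Int) :=
  let radii := get_radii_alt r
  let bands := (PySem.List.pyRange 0 ((radii.length : Int) - 1) 1).flatMap (ringAt xm ym zm radii)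
  match PySem.List.pyGet? radii r with
  | none => bands   -- Python raises IndexError here; such inputs are outside Pre_
  | some cap =>
    bands ++ (PySem.List.pyRange (-cap) (cap + 1) 1).flatMap (fun x =>
      (PySem.List.pyRange (-cap) (cap + 1) 1).flatMap (fun y =>
        [[x + xm, y + ym, r + zm], [x + xm, y + ym, zm - r]]))

-- ===== PRECONDITION & SPEC =====
-- For r < -2, radii = [1, 0] and A's radii[r] is an out-of-range negative index: IndexError
-- (B raises identically there). Pre_ excludes exactly those raising inputs.
def Pre_sphere_shell (xm : Int) (ym : Int) (zm : Int) (r : Int) : Prop := -2 ≤ r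
instance (xm : Int) (ym : Int) (zm : Int) (r : Int) : Decidable (Pre_sphere_shell xm ym zm r) := by unfold Pre_sphere_shell; infer_instance
def pvWitness_sphere_shell : Int × Int × Int × Int := (1, -2, 3, 3)

def Spec_sphere_shell (xm : Int) (ym : Int) (zm : Int) (r : Int) (out : List (List Int)) : Prop := out = sphere_shell_alt xm ym zm r
instance (xm : Int) (ym : Int) (zm : Int) (r : Int) (out : List (List Int)) : Decidable (Spec_sphere_shell xm ym zm r out) := by unfold Spec_sphere_shell; infer_instance

-- ===== CLAIM (what is proved, stated in full; the proofs are below) =====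
def Claim_equal_sphere_shell : Prop := ∀ (xm : Int) (ym : Int) (zm : Int) (r : Int), Dom_sphere_shell xm ym zm r → Pre_sphere_shell xm ym zm r → Spec_sphere_shell xm ym zm r (sphere_shell xm ym zm r)

-- ===== LEMMAS AND PROOFS =====

theorem bresLoop_eq (xm ym : Int) : ∀ (fuel : Nat) (x y err : Int) (acc : List (List Int)),
    bresLoop xm ym fuel x y err acc = acc ++ (bresStatesB fuel x y err).flatMap (quadPoints xm ym) := by
  intro fuel
  induction fuel with
  | zero => intro x y err acc; simp [bresLoop, bresStatesB]
  | succ n IH =>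
    intro x y err acc
    by_cases hx : x < 0
    · by_cases hr : err > x
      · by_cases hy : err ≤ y
        · simp only [bresLoop, bresStatesB, if_pos hx, if_pos hr, if_pos hy, IH]
          simp [bresNext, if_pos hr, if_pos hy, quadPoints]
        · simp only [bresLoop, bresStatesB, if_pos hx, if_pos hr, if_neg hy, IH]
          simp [bresNext, if_pos hr, if_neg hy, quadPoints]
      · by_cases hy : err ≤ y
        · simp only [bresLoop, bresStatesB, if_pos hx, if_neg hr, if_pos hy, IH]
          simp [bresNext, if_neg hr, if_pos hy, quadPoints]
        · simp only [bresLoop, bresStatesB, if_pos hx, if_neg hr, if_neg hy, IH]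
          simp [bresNext, if_neg hr, if_neg hy, quadPoints]
    · simp [bresLoop, bresStatesB, if_neg hx]

theorem bres_eq (xm ym r : Int) : bres_circle xm ym r = bres_circle_alt xm ym r := by
  rw [bres_circle, bres_circle_alt, bresLoop_eq]
  simp

theorem indexD (C : List (List Int)) (step : Int) :
    (C.foldl (fun d zc =>
        if 0 < PySem.List.pyGetD zc 1 0 then
          d.modify (PySem.List.pyGetD zc 0 0) [] (fun l => l ++ [PySem.List.pyGetD zc 1 0])
        else d) PySem.Dict.empty).getD step []
      = (C.filter (fun zc => decide (PySem.List.pyGetD zc 0 0 = step ∧ 0 < PySem.List.pyGetD zc 1 0))).map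
          (fun zc => PySem.List.pyGetD zc 1 0) := by
  rw [PySem.List.foldl_ite_eq_foldl_filter]
  have h2 : ((List.filter (fun zc => decide (0 < PySem.List.pyGetD zc 1 0)) C).map
        (fun zc => (PySem.List.pyGetD zc 0 0, PySem.List.pyGetD zc 1 0))).foldl
          (fun (d : PySem.Dict Int (List Int)) p => d.modify p.1 [] (fun l => l ++ [p.2]))
          PySem.Dict.empty
      = (List.filter (fun zc => decide (0 < PySem.List.pyGetD zc 1 0)) C).foldl
          (fun d zc => d.modify (PySem.List.pyGetD zc 0 0) [] (fun l => l ++ [PySem.List.pyGetD zc 1 0]))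
          PySem.Dict.empty := by
    rw [List.foldl_map]
  rw [← h2, PySem.Dict.getD_foldl_modify_append]
  simp [List.filter_map, List.filter_filter, Function.comp_def, beq_eq_decide]

theorem radii_eq (r : Int) : get_radii r = get_radii_alt r := by
  rw [get_radii, get_radii_alt]
  by_cases h : r > 1
  · rw [if_pos h, if_neg (by omega)]
    rw [bres_eq]
    apply PySem.List.foldl_congr_mem
    intro acc step _
    rw [PySem.List.foldl_append_ite
          (p := fun zc => PySem.List.pyGetD zc 0 0 = step ∧ 0 < PySem.List.pyGetD zc 1 0)
          (f := fun zc => PySem.List.pyGetD zc 1 0)]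
    rw [indexD]
  · rw [if_neg h, if_pos (by omega)]

theorem zloop_eq (xm ym zm : Int) (radii : List Int) : ∀ (z : Int), 0 ≤ z →
    ∀ (acc : List (List Int)),
    (bres_circle_alt xm ym (PySem.List.pyGetD radii z 0)).foldl (fun shell ci =>
      let shell' := shell ++ [ci ++ [z + zm]]
      if z > 0 then shell' ++ [ci ++ [zm - z]] else shell') acc
    = acc ++ ringAt xm ym zm radii z := by
  intro z hz0 acc
  rw [ringAt]
  rcases eq_or_lt_of_le hz0 with h0 | hpos
  · rw [if_pos h0.symm, ← h0]
    simp only [gt_iff_lt, lt_self_iff_false, if_false]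
    rw [PySem.List.foldl_append_singleton_eq_map]
    simp
  · have hne : z ≠ 0 := by omega
    rw [if_neg hne]
    simp only [gt_iff_lt, hpos, if_true, List.append_assoc, List.singleton_append]
    rw [PySem.List.foldl_append_eq_flatMap]
    simp [Int.add_comm zm z]

-- ===== VERDICT (by name: the statement is the Claim_ definition above) =====
theorem sphere_shell_spec : Claim_equal_sphere_shell := by
  intro xm ym zm r _hD _hP
  unfold Spec_sphere_shell
  simp only [sphere_shell, sphere_shell_alt, radii_eq, bres_eq]
  have hfold : (PySem.List.pyRange 0 (((get_radii_alt r).length : Int) - 1) 1).foldl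
      (fun shell z =>
        (bres_circle_alt xm ym (PySem.List.pyGetD (get_radii_alt r) z 0)).foldl (fun shell ci =>
          let shell' := shell ++ [ci ++ [z + zm]]
          if z > 0 then shell' ++ [ci ++ [zm - z]] else shell') shell) []
      = (PySem.List.pyRange 0 (((get_radii_alt r).length : Int) - 1) 1).foldl
      (fun shell z => shell ++ ringAt xm ym zm (get_radii_alt r) z) [] := by
    apply PySem.List.foldl_congr_mem
    intro acc z hmem
    exact zloop_eq xm ym zm (get_radii_alt r) z (PySem.List.mem_pyRange_one.mp hmem).1 acc
  rw [hfold, PySem.List.foldl_append_eq_flatMap]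
  rcases hcap : PySem.List.pyGet? (get_radii_alt r) r with _ | cap
  · simp
  · dsimp only
    have h2 : ∀ (acc : List (List Int)) (x : Int), x ∈ PySem.List.pyRange (-cap) (cap + 1) 1 →
        (PySem.List.pyRange (-cap) (cap + 1) 1).foldl (fun shell y =>
            shell ++ [[x + xm, y + ym, r + zm], [x + xm, y + ym, zm - r]]) acc
        = acc ++ (PySem.List.pyRange (-cap) (cap + 1) 1).flatMap
            (fun y => [[x + xm, y + ym, r + zm], [x + xm, y + ym, zm - r]]) := by
      intro acc x _
      rw [PySem.List.foldl_append_eq_flatMap]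
    rw [PySem.List.foldl_congr_mem _ _ _ _ h2, PySem.List.foldl_append_eq_flatMap]
    simp
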